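-- pv_equiv track=rewrite | github.com/poow810/Baekjoon | 프로그래머스/2/340212. ［PCCP 기출문제］ 2번 ／ 퍼즐 게임 챌린지/［PCCP 기출문제］ 2번 ／ 퍼즐 게임 챌린지.py | solution
-- ===== SOURCE A (Python) =====
-- def solution(diffs, times, limit):
--     left = diffs[0]
--     right = max(diffs)
--     answer = 0
--
--     while left <= right:
--         mid = (left+right) // 2
--         count = 0
--
--         for i in range(len(diffs)):
--             if diffs[i] <= mid:
--                 count += times[i]
--
--             else:
--                 count += (diffs[i] - mid) * (times[i-1] + times[i]) + times[i]
--
--         if count <= limit: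
--             right = mid - 1
--             answer = mid
--
--         else:
--             left = mid + 1
--
--     return answer
-- ===== SOURCE B (Python) =====
-- def _suffix(pairs, f):
--     # suffix sums of f over pairs: acc[k] == sum(f(p) for p in pairs[k:]), len == len(pairs)+1
--     acc = [0]
--     for p in pairs[::-1]:
--         acc.append(f(p) + acc[-1])
--     acc.reverse()
--     return acc
--
--
-- def _bisect_right(a, x):
--     lo, hi = 0, len(a)
--     while lo < hi:
--         m = (lo + hi) // 2
--         if x < a[m]:
--             hi = m
--         else:
--             lo = m + 1
--     return lo
--
--
-- def solution(diffs, times, limit):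
--     n = len(diffs)
--     base = sum(times[:n])
--     pairs = sorted(((diffs[i], times[i - 1] + times[i]) for i in range(n)), key=lambda p: p[0])
--     ds = [p[0] for p in pairs]
--     sdw = _suffix(pairs, lambda p: p[0] * p[1])
--     sw = _suffix(pairs, lambda p: p[1])
--     left, right, answer = diffs[0], max(diffs), 0
--     while left <= right:
--         mid = (left + right) // 2
--         k = _bisect_right(ds, mid)
--         total = base + sdw[k] - mid * sw[k]
--         if total <= limit:
--             answer, right = mid, mid - 1
--         else:
--             left = mid + 1
--     return answer
-- ===== Notes on version B (the rewrite author's own statement) =====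
-- stated objective: alternative
-- what changed: The O(n) per-probe rescan of all puzzles is replaced by a one-time stable sort of (diff, weight) pairs with suffix sums, so each binary-search probe computes the total time by a hand-written bisection plus two suffix-sum lookups in O(log n).
import Mathlib
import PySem

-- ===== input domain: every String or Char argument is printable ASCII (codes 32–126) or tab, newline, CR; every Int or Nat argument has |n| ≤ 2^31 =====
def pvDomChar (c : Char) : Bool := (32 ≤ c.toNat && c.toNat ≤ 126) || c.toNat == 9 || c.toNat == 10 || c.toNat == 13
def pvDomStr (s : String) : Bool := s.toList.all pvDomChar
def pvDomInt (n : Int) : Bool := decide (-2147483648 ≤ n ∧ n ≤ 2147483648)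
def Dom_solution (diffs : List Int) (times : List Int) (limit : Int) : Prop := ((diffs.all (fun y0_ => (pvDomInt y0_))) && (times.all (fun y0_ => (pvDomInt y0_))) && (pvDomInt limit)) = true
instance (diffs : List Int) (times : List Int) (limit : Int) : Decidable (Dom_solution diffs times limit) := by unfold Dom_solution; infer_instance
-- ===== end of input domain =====

-- B replaces A's O(n) rescan per binary-search probe by a one-time sort of (diff, weight)
-- pairs with suffix sums, answering each probe by bisection + two lookups; return values agree.

-- ===== PORT A =====
-- the inner 'for i in range(len(diffs))' accumulation of A, for one probe 'mid'
def countA (diffs times : List Int) (mid : Int) : Int :=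
  (PySem.List.pyRange 0 (diffs.length : Int) 1).foldl (fun count i =>
    if PySem.List.pyGetD diffs i 0 ≤ mid then
      count + PySem.List.pyGetD times i 0
    else
      count + ((PySem.List.pyGetD diffs i 0 - mid) *
                 (PySem.List.pyGetD times (i - 1) 0 + PySem.List.pyGetD times i 0) +
               PySem.List.pyGetD times i 0)) 0

-- A's 'while left <= right' binary search
def loopA (diffs times : List Int) (limit left right answer : Int) : Int :=
  if h : left ≤ right then
    let mid := PySem.Int.floordiv (left + right) 2
    let count := countA diffs times mid
    if count ≤ limit then loopA diffs times limit left (mid - 1) mid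
    else loopA diffs times limit (mid + 1) right answer
  else answer
termination_by (right + 1 - left).toNat
decreasing_by
  · have hb := PySem.Int.floordiv_two_mid_bounds h; omega
  · have hb := PySem.Int.floordiv_two_mid_bounds h; omega

def solution (diffs : List Int) (times : List Int) (limit : Int) : Int :=
  let left := PySem.List.pyGetD diffs 0 0
  let right := (PySem.List.max? diffs (fun x => x)).getD 0
  loopA diffs times limit left right 0

-- ===== PORT B =====
-- _suffix(pairs, f): 'for p in pairs[::-1]: acc.append(f(p) + acc[-1])' then reverse
-- (pairs[::-1] is pairs.reverse, PySem.List.slice?_none_none_neg_one; acc[-1] is pyGetD acc (-1))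
def suffixB (pairs : List (Int × Int)) (f : Int × Int → Int) : List Int :=
  (pairs.reverse.foldl (fun acc p => acc ++ [f p + PySem.List.pyGetD acc (-1) 0]) [0]).reverse

-- _bisect_right's 'while lo < hi' loop
def bisectLoop (a : List Int) (x lo hi : Int) : Int :=
  if h : lo < hi then
    let m := PySem.Int.floordiv (lo + hi) 2
    if x < PySem.List.pyGetD a m 0 then bisectLoop a x lo m
    else bisectLoop a x (m + 1) hi
  else lo
termination_by (hi - lo).toNat
decreasing_by
  · have hb := PySem.Int.floordiv_two_mid_bounds (le_of_lt h)
    have hm : PySem.Int.floordiv (lo + hi) 2 < hi := by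
      rw [PySem.Int.floordiv_lt_iff_lt_mul (by omega)]; omega
    omega
  · have hb := PySem.Int.floordiv_two_mid_bounds (le_of_lt h); omega

def bisectB (a : List Int) (x : Int) : Int := bisectLoop a x 0 (a.length : Int)

-- B's 'while left <= right' binary search over the precomputed tables
def loopB (base : Int) (ds sdw sw : List Int) (limit left right answer : Int) : Int :=
  if h : left ≤ right then
    let mid := PySem.Int.floordiv (left + right) 2
    let k := bisectB ds mid
    let total := base + PySem.List.pyGetD sdw k 0 - mid * PySem.List.pyGetD sw k 0
    if total ≤ limit then loopB base ds sdw sw limit left (mid - 1) mid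
    else loopB base ds sdw sw limit (mid + 1) right answer
  else answer
termination_by (right + 1 - left).toNat
decreasing_by
  · have hb := PySem.Int.floordiv_two_mid_bounds h; omega
  · have hb := PySem.Int.floordiv_two_mid_bounds h; omega

def solution_alt (diffs : List Int) (times : List Int) (limit : Int) : Int :=
  let n := diffs.length
  let base := (PySem.List.slice times none (some (n : Int))).sum
  let pairs := PySem.List.sorted
    ((PySem.List.pyRange 0 (n : Int) 1).map (fun i =>
      (PySem.List.pyGetD diffs i 0,
       PySem.List.pyGetD times (i - 1) 0 + PySem.List.pyGetD times i 0)))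
    (fun p => p.1) false
  let ds := pairs.map (fun p => p.1)
  let sdw := suffixB pairs (fun p => p.1 * p.2)
  let sw := suffixB pairs (fun p => p.2)
  let left := PySem.List.pyGetD diffs 0 0
  let right := (PySem.List.max? diffs (fun x => x)).getD 0
  loopB base ds sdw sw limit left right 0

-- ===== PRECONDITION & SPEC =====
-- Pre_ excludes exactly the inputs where A raises IndexError: empty diffs (diffs[0], max(diffs))
-- or times shorter than diffs (times[i] for i < len(diffs)).
def Pre_solution (diffs : List Int) (times : List Int) (limit : Int) : Prop :=
  diffs ≠ [] ∧ diffs.length ≤ times.length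
instance (diffs : List Int) (times : List Int) (limit : Int) : Decidable (Pre_solution diffs times limit) := by unfold Pre_solution; infer_instance

def pvWitness_solution : List Int × List Int × Int := ([1, 2, 3], [10, 20, 30], 100)

def Spec_solution (diffs : List Int) (times : List Int) (limit : Int) (out : Int) : Prop := out = solution_alt diffs times limit
instance (diffs : List Int) (times : List Int) (limit : Int) (out : Int) : Decidable (Spec_solution diffs times limit out) := by unfold Spec_solution; infer_instance

-- ===== CLAIM (what is proved, stated in full; the proofs are below) =====
def Claim_equal_solution : Prop := ∀ (diffs : List Int) (times : List Int) (limit : Int), Dom_solution diffs times limit → Pre_solution diffs times limit → Spec_solution diffs times limit (solution diffs times limit)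

-- ===== LEMMAS AND PROOFS =====

-- suffix-sum helper: recursive characterisation of suffixB
def specS (f : Int × Int → Int) : List (Int × Int) → List Int
  | [] => [0]
  | p :: ps => (f p + (specS f ps).headD 0) :: specS f ps

theorem specS_ne_nil (f : Int × Int → Int) (l : List (Int × Int)) : specS f l ≠ [] := by
  cases l <;> simp [specS]

theorem suffixB_eq_specS (f : Int × Int → Int) (l : List (Int × Int)) :
    suffixB l f = specS f l := by
  suffices h : ∀ l, (l.reverse.foldl (fun acc p => acc ++ [f p + PySem.List.pyGetD acc (-1) 0]) [0]) = (specS f l).reverse by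
    simp [suffixB, h]
  intro l
  induction l with
  | nil => simp [specS]
  | cons p ps ih =>
      simp only [List.reverse_cons, List.foldl_append, List.foldl_cons, List.foldl_nil, ih]
      have hne : (specS f ps).reverse ≠ [] := by
        simp [specS_ne_nil]
      rw [PySem.List.pyGetD_neg_one _ _ hne]
      simp [specS, List.getLast_reverse, List.head?_eq_some_head (specS_ne_nil f ps)]

theorem length_specS (f : Int × Int → Int) (l : List (Int × Int)) :
    (specS f l).length = l.length + 1 := by
  induction l with
  | nil => simp [specS]
  | cons p ps ih => simp [specS, ih]

theorem specS_headD (f : Int × Int → Int) (l : List (Int × Int)) :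
    (specS f l).headD 0 = (l.map f).sum := by
  induction l with
  | nil => simp [specS]
  | cons p ps ih => simp [specS] at ih ⊢; exact ih

theorem specS_getD (f : Int × Int → Int) (l : List (Int × Int)) (k : Nat) (hk : k ≤ l.length) :
    (specS f l).getD k 0 = ((l.drop k).map f).sum := by
  induction l generalizing k with
  | nil => simp at hk; subst hk; simp [specS]
  | cons p ps ih =>
      cases k with
      | zero =>
          have := specS_headD f (p :: ps)
          simpa [List.headD_eq_head?, specS] using this
      | succ k => simpa [specS] using ih k (by simpa using hk)

-- bisection loop invariant: on a ≤-sorted list it returns the upper boundary of the ≤ x prefix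
theorem bisectLoop_inv (a : List Int) (x : Int)
    (ha : a.Pairwise (· ≤ ·)) :
    ∀ (lo hi : Int), 0 ≤ lo → lo ≤ hi → hi ≤ (a.length : Int) →
    (∀ (j : Nat) (hj : j < a.length), (j : Int) < lo → a[j] ≤ x) →
    (∀ (j : Nat) (hj : j < a.length), hi ≤ (j : Int) → x < a[j]) →
    0 ≤ bisectLoop a x lo hi ∧ bisectLoop a x lo hi ≤ (a.length : Int) ∧
      (∀ (j : Nat) (hj : j < a.length), ((j : Int) < bisectLoop a x lo hi ↔ a[j] ≤ x)) := by
  intro lo hi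
  induction lo, hi using bisectLoop.induct a x with
  | case1 lo hi h m hx ih =>
      intro h0 hlh hhn hlow hhigh
      have hb := PySem.Int.floordiv_two_mid_bounds (le_of_lt h)
      have hm : PySem.Int.floordiv (lo + hi) 2 < hi := by
        rw [PySem.Int.floordiv_lt_iff_lt_mul (by omega)]; omega
      have hmeq : PySem.Int.floordiv (lo + hi) 2 = m := rfl
      rw [hmeq] at hb hm
      rw [bisectLoop]; simp only [h, dite_true]; rw [hmeq, if_pos hx]
      refine ih h0 (by omega) (by omega) hlow ?_
      intro j hj hmj
      have hmn : m.toNat < a.length := by omega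
      have hax : x < a[m.toNat] := by
        have heq : PySem.List.pyGetD a m 0 = a[m.toNat] := by
          rw [PySem.List.pyGetD_eq_getElem] <;> omega
        rwa [heq] at hx
      rcases eq_or_lt_of_le hmj with heq | hlt
      · have : j = m.toNat := by omega
        simpa [this] using hax
      · have hle : a[m.toNat] ≤ a[j] := by
          rw [List.pairwise_iff_getElem] at ha
          exact ha m.toNat j hmn hj (by omega)
        omega
  | case2 lo hi h m hx ih =>
      intro h0 hlh hhn hlow hhigh
      have hb := PySem.Int.floordiv_two_mid_bounds (le_of_lt h)
      have hm : PySem.Int.floordiv (lo + hi) 2 < hi := by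
        rw [PySem.Int.floordiv_lt_iff_lt_mul (by omega)]; omega
      have hmeq : PySem.Int.floordiv (lo + hi) 2 = m := rfl
      rw [hmeq] at hb hm
      rw [bisectLoop]; simp only [h, dite_true]; rw [hmeq, if_neg hx]
      refine ih (by omega) (by omega) hhn ?_ hhigh
      intro j hj hjm
      have hmn : m.toNat < a.length := by omega
      have hax : a[m.toNat] ≤ x := by
        have heq : PySem.List.pyGetD a m 0 = a[m.toNat] := by
          rw [PySem.List.pyGetD_eq_getElem] <;> omega
        rw [heq] at hx; omega
      rcases lt_or_ge (j : Int) (m : Int) with hlt | hge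
      · have hle : a[j] ≤ a[m.toNat] := by
          rw [List.pairwise_iff_getElem] at ha
          exact ha j m.toNat hj hmn (by omega)
        omega
      · have : j = m.toNat := by omega
        simpa [this] using hax
  | case3 lo hi h =>
      intro h0 hlh hhn hlow hhigh
      rw [bisectLoop]; simp only [h, dite_false]
      refine ⟨h0, by omega, ?_⟩
      intro j hj
      constructor
      · intro hjlo; exact hlow j hj hjlo
      · intro haj
        by_contra hge
        have := hhigh j hj (by omega)
        omega

theorem bisectB_spec (a : List Int) (x : Int) (ha : a.Pairwise (· ≤ ·)) :
    0 ≤ bisectB a x ∧ bisectB a x ≤ (a.length : Int) ∧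
      (∀ (j : Nat) (hj : j < a.length), ((j : Int) < bisectB a x ↔ a[j] ≤ x)) := by
  refine bisectLoop_inv a x ha 0 (a.length : Int) le_rfl (by positivity) le_rfl ?_ ?_
  · intro j hj hjlt; omega
  · intro j hj hge; omega

theorem sum_map_sub {α : Type} (l : List α) (f g : α → Int) :
    (l.map (fun x => f x - g x)).sum = (l.map f).sum - (l.map g).sum := by
  induction l with
  | nil => simp
  | cons x xs ih => simp [ih]; ring

-- A's probe count as two sums: the times themselves plus the over-difficulty penalties
theorem countA_eq_sum (diffs times : List Int) (mid : Int) :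
    countA diffs times mid =
      ((PySem.List.pyRange 0 (diffs.length : Int) 1).map (fun i => PySem.List.pyGetD times i 0)).sum
      + ((PySem.List.pyRange 0 (diffs.length : Int) 1).map (fun i =>
          if mid < PySem.List.pyGetD diffs i 0 then
            (PySem.List.pyGetD diffs i 0 - mid) *
              (PySem.List.pyGetD times (i - 1) 0 + PySem.List.pyGetD times i 0)
          else 0)).sum := by
  unfold countA
  have hbody : (fun (count : Int) (i : Int) =>
      if PySem.List.pyGetD diffs i 0 ≤ mid then
        count + PySem.List.pyGetD times i 0
      else
        count + ((PySem.List.pyGetD diffs i 0 - mid) *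
                   (PySem.List.pyGetD times (i - 1) 0 + PySem.List.pyGetD times i 0) +
                 PySem.List.pyGetD times i 0)) =
      (fun (count : Int) (i : Int) => count +
        (PySem.List.pyGetD times i 0 +
          (if mid < PySem.List.pyGetD diffs i 0 then
            (PySem.List.pyGetD diffs i 0 - mid) *
              (PySem.List.pyGetD times (i - 1) 0 + PySem.List.pyGetD times i 0)
          else 0))) := by
    funext count i
    by_cases h : PySem.List.pyGetD diffs i 0 ≤ mid
    · simp [h, if_neg (by omega : ¬ mid < PySem.List.pyGetD diffs i 0)]
    · simp [h, if_pos (by omega : mid < PySem.List.pyGetD diffs i 0)]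
      ring
  rw [hbody, PySem.List.foldl_add]
  simp

-- sum(times[:n]) equals the sum of times[i] over range(n), for n ≤ len(times)
theorem base_eq (times : List Int) (n : Nat) (hn : n ≤ times.length) :
    ((PySem.List.pyRange 0 (n : Int) 1).map (fun i => PySem.List.pyGetD times i 0)).sum
      = (times.take n).sum := by
  have hlen : ((times.take n).length : Int) = (n : Int) := by simp [List.length_take]; omega
  have h0 := PySem.List.map_pyGetD_pyRange_zero (times.take n) (0 : Int)
  simp only [PySem.List.len_eq] at h0
  rw [hlen] at h0
  rw [← h0]
  apply congrArg
  apply List.map_congr_left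
  intro i hi
  rw [PySem.List.mem_pyRange_one] at hi
  rw [PySem.List.pyGetD_eq_getElem times 0 (by omega) (by omega),
      PySem.List.pyGetD_eq_getElem (List.take n times) 0 (by omega)
        (by simp [List.length_take]; omega)]
  rw [List.getElem_take]

-- the penalty sum over the sorted pairs, via the bisection cut and the two suffix tables
theorem cut_sum (S : List (Int × Int)) (mid : Int)
    (hpair : (S.map (fun p => p.1)).Pairwise (· ≤ ·)) :
    (S.map (fun p => if mid < p.1 then (p.1 - mid) * p.2 else 0)).sum
      = PySem.List.pyGetD (suffixB S (fun p => p.1 * p.2)) (bisectB (S.map (fun p => p.1)) mid) 0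
        - mid * PySem.List.pyGetD (suffixB S (fun p => p.2)) (bisectB (S.map (fun p => p.1)) mid) 0 := by
  obtain ⟨hk0, hkn, hiff⟩ := bisectB_spec (S.map (fun p => p.1)) mid hpair
  set k := bisectB (S.map (fun p => p.1)) mid with hk
  have hlen : (S.map (fun p => p.1)).length = S.length := by simp
  have hknS : k.toNat ≤ S.length := by omega
  -- the two table lookups are suffix sums
  have hlook : ∀ f : Int × Int → Int,
      PySem.List.pyGetD (suffixB S f) k 0 = ((S.drop k.toNat).map f).sum := by
    intro f
    rw [suffixB_eq_specS]
    rw [PySem.List.pyGetD_eq_getElem (specS f S) 0 hk0 (by rw [length_specS]; omega)]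
    rw [← List.getD_eq_getElem (specS f S) 0 (by rw [length_specS]; omega)]
    exact specS_getD f S k.toNat hknS
  rw [hlook, hlook]
  -- split the sum at the cut
  have hsplit : (S.map (fun p => if mid < p.1 then (p.1 - mid) * p.2 else 0)).sum
      = ((S.take k.toNat).map (fun p => if mid < p.1 then (p.1 - mid) * p.2 else 0)).sum
        + ((S.drop k.toNat).map (fun p => if mid < p.1 then (p.1 - mid) * p.2 else 0)).sum := by
    rw [← List.sum_append, ← List.map_append, List.take_append_drop]
  rw [hsplit]
  -- prefix part: everything there has difficulty ≤ mid, contributes 0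
  have htake : ((S.take k.toNat).map (fun p => if mid < p.1 then (p.1 - mid) * p.2 else 0)).sum = 0 := by
    apply List.sum_eq_zero
    intro x hx
    rw [List.mem_map] at hx
    obtain ⟨p, hp, hpx⟩ := hx
    obtain ⟨j, hj, hjp⟩ := List.getElem_of_mem hp
    have hjlt : j < k.toNat := by
      have := hj; simp [List.length_take] at this; omega
    have hjS : j < S.length := by omega
    rw [List.getElem_take] at hjp
    have hds : (S.map (fun p => p.1))[j] = p.1 := by
      rw [List.getElem_map, hjp]
    have hle : p.1 ≤ mid := by
      have := (hiff j (by omega)).mp (by omega)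
      rwa [hds] at this
    rw [← hpx, if_neg (by omega)]
  rw [htake, zero_add]
  -- suffix part: everything there has difficulty > mid
  have hdropc : (S.drop k.toNat).map (fun p => if mid < p.1 then (p.1 - mid) * p.2 else 0)
      = (S.drop k.toNat).map (fun p => p.1 * p.2 - mid * p.2) := by
    apply List.map_congr_left
    intro p hp
    obtain ⟨j, hj, hjp⟩ := List.getElem_of_mem hp
    have hjS : k.toNat + j < S.length := by
      have := hj; simp [List.length_drop] at this; omega
    rw [List.getElem_drop] at hjp
    have hds : (S.map (fun p => p.1))[k.toNat + j] = p.1 := by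
      rw [List.getElem_map, hjp]
    have hgt : mid < p.1 := by
      have hnot : ¬ ((k.toNat + j : Int) < k) := by omega
      have := (hiff (k.toNat + j) (by omega))
      rw [hds] at this
      have := mt this.mpr hnot
      omega
    rw [if_pos hgt]; ring
  rw [hdropc]
  have := sum_map_sub (S.drop k.toNat) (fun p => p.1 * p.2) (fun p => mid * p.2)
  rw [this, List.sum_map_mul_left]

-- one probe: A's rescan equals B's table lookup formula
theorem count_eq (diffs times : List Int) (hn : diffs.length ≤ times.length) (mid : Int) :
    countA diffs times mid =
      (PySem.List.slice times none (some (diffs.length : Int))).sum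
      + PySem.List.pyGetD
          (suffixB (PySem.List.sorted
            ((PySem.List.pyRange 0 (diffs.length : Int) 1).map (fun i =>
              (PySem.List.pyGetD diffs i 0,
               PySem.List.pyGetD times (i - 1) 0 + PySem.List.pyGetD times i 0)))
            (fun p => p.1) false) (fun p => p.1 * p.2))
          (bisectB ((PySem.List.sorted
            ((PySem.List.pyRange 0 (diffs.length : Int) 1).map (fun i =>
              (PySem.List.pyGetD diffs i 0,
               PySem.List.pyGetD times (i - 1) 0 + PySem.List.pyGetD times i 0)))
            (fun p => p.1) false).map (fun p => p.1)) mid) 0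
      - mid * PySem.List.pyGetD
          (suffixB (PySem.List.sorted
            ((PySem.List.pyRange 0 (diffs.length : Int) 1).map (fun i =>
              (PySem.List.pyGetD diffs i 0,
               PySem.List.pyGetD times (i - 1) 0 + PySem.List.pyGetD times i 0)))
            (fun p => p.1) false) (fun p => p.2))
          (bisectB ((PySem.List.sorted
            ((PySem.List.pyRange 0 (diffs.length : Int) 1).map (fun i =>
              (PySem.List.pyGetD diffs i 0,
               PySem.List.pyGetD times (i - 1) 0 + PySem.List.pyGetD times i 0)))
            (fun p => p.1) false).map (fun p => p.1)) mid) 0 := by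
  set pb : Int → Int × Int := fun i =>
    (PySem.List.pyGetD diffs i 0,
     PySem.List.pyGetD times (i - 1) 0 + PySem.List.pyGetD times i 0) with hpb
  set P : List (Int × Int) := (PySem.List.pyRange 0 (diffs.length : Int) 1).map pb with hP
  set S : List (Int × Int) := PySem.List.sorted P (fun p => p.1) false with hS
  rw [countA_eq_sum]
  have hbase : (PySem.List.slice times none (some (diffs.length : Int))).sum
      = ((PySem.List.pyRange 0 (diffs.length : Int) 1).map
          (fun i => PySem.List.pyGetD times i 0)).sum := by
    rw [PySem.List.slice_to_natCast, base_eq times diffs.length hn]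
  rw [hbase]
  have hpen : ((PySem.List.pyRange 0 (diffs.length : Int) 1).map (fun i =>
      if mid < PySem.List.pyGetD diffs i 0 then
        (PySem.List.pyGetD diffs i 0 - mid) *
          (PySem.List.pyGetD times (i - 1) 0 + PySem.List.pyGetD times i 0)
      else 0)).sum
      = (S.map (fun p => if mid < p.1 then (p.1 - mid) * p.2 else 0)).sum := by
    have hperm : (S.map (fun p => if mid < p.1 then (p.1 - mid) * p.2 else 0)).Perm
        (P.map (fun p => if mid < p.1 then (p.1 - mid) * p.2 else 0)) :=
      (PySem.List.sorted_perm P (fun p => p.1) false).map _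
    rw [hperm.sum_eq, hP, List.map_map]
    rfl
  rw [hpen, cut_sum S mid (by rw [hS]; exact PySem.List.sorted_map_key_pairwise P (fun p => p.1))]
  ring

-- the two binary-search drivers take the same branches and return the same answer
theorem loop_eq (diffs times : List Int) (limit base : Int) (ds sdw sw : List Int)
    (hcount : ∀ mid, countA diffs times mid =
      base + PySem.List.pyGetD sdw (bisectB ds mid) 0
        - mid * PySem.List.pyGetD sw (bisectB ds mid) 0) :
    ∀ left right answer,
      loopA diffs times limit left right answer = loopB base ds sdw sw limit left right answer := by
  intro left right answer
  induction left, right, answer using loopA.induct diffs times limit with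
  | case1 left right answer h mid count hc ih =>
      rw [loopA, loopB]
      simp only [h, dite_true]
      rw [← hcount]
      split_ifs with h2
      · exact ih
      · exact absurd hc h2
  | case2 left right answer h mid count hc ih =>
      rw [loopA, loopB]
      simp only [h, dite_true]
      rw [← hcount]
      split_ifs with h2
      · exact absurd h2 hc
      · exact ih
  | case3 left right answer h =>
      rw [loopA, loopB]
      simp only [h, dite_false]

-- ===== VERDICT (by name: the statement is the Claim_ definition above) =====
theorem solution_spec : Claim_equal_solution := by
  intro diffs times limit hdom hpre
  unfold Spec_solution
  obtain ⟨hne, hlen⟩ := hpre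
  unfold solution solution_alt
  exact loop_eq diffs times limit _ _ _ _ (count_eq diffs times hlen) _ _ 0
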